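-- pv_equiv track=rewrite | github.com/nassimDev-ctrl/information-security-tasks | Information security/adfgvx_cipher.py | adfgvx_key_matrix
-- ===== SOURCE A (Python) =====
-- SYMBOLS = "ABCDEFGHIJKLMNOPQRSTUVWXYZ0123456789"
--
-- def adfgvx_key_matrix(key):
--
--     key = key.upper()
--
--     seen = set()
--     matrix = []
--
--     for ch in key:
--         if ch in SYMBOLS and ch not in seen:
--             seen.add(ch)
--             matrix.append(ch)
--
--     for ch in SYMBOLS:
--         if ch not in seen:
--             matrix.append(ch)
--
--     return [matrix[i:i+6] for i in range(0, 36, 6)]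
-- ===== SOURCE B (Python) =====
-- SYMBOLS = "ABCDEFGHIJKLMNOPQRSTUVWXYZ0123456789"
--
-- def adfgvx_key_matrix(key):
--     # Rank-and-sort: give every symbol a numeric rank (first-occurrence index in the
--     # upper-cased key if it occurs there, else len(key) + its SYMBOLS index) and sort
--     # SYMBOLS by that rank; ranks are all distinct, so this names A's ordering directly.
--     k = list(key.upper())
--     n = len(k)
--     def rank(c):
--         return k.index(c) if c in k else n + SYMBOLS.index(c)
--     order = sorted(SYMBOLS, key=rank)
--     return [order[i:i+6] for i in range(0, 36, 6)]
-- ===== Notes on version B (the rewrite author's own statement) =====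
-- stated objective: alternative
-- what changed: Replaces A's two branch-guarded appending passes with an explicit seen-set by a rank-and-sort: each symbol gets a distinct numeric rank (first index in the upper-cased key, else len(key)+SYMBOLS index) and SYMBOLS is sorted by that rank, then sliced into six rows.
import Mathlib
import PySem

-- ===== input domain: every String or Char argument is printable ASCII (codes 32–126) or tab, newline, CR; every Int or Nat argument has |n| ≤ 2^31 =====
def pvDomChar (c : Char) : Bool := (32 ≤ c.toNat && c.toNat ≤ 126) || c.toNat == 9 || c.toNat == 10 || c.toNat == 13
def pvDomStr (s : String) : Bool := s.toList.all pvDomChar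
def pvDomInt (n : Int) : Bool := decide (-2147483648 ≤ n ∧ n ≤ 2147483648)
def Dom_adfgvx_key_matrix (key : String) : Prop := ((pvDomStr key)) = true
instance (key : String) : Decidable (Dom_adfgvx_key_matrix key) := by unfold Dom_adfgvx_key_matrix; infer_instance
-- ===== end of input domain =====

-- B replaces A's two branch-guarded appending passes (seen-set + matrix list) by a rank-and-sort:
-- every symbol gets a distinct numeric rank and SYMBOLS is sorted by it (objective: alternative).

def pvSymChars : List Char := "ABCDEFGHIJKLMNOPQRSTUVWXYZ0123456789".toList

def pvMk (c : Char) : String := String.ofList [c]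

-- ===== PORT A =====
def adfgvx_key_matrix (key : String) : List (List String) :=
  let kU := PySem.Str.upper key
  -- first loop: for ch in key: if ch in SYMBOLS and ch not in seen: seen.add(ch); matrix.append(ch)
  let st := kU.toList.foldl
    (fun (st : PySem.Set Char × List String) ch =>
      if pvSymChars.contains ch && !(PySem.Set.contains st.1 ch) then
        (PySem.Set.add st.1 ch, st.2 ++ [pvMk ch])
      else st)
    (PySem.Set.empty, [])
  -- second loop: for ch in SYMBOLS: if ch not in seen: matrix.append(ch)
  let st2 := pvSymChars.foldl
    (fun (st : PySem.Set Char × List String) ch =>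
      if !(PySem.Set.contains st.1 ch) then (st.1, st.2 ++ [pvMk ch]) else st)
    st
  (PySem.List.pyRange 0 36 6).map (fun i => PySem.List.slice st2.2 (some i) (some (i + 6)))

-- ===== PORT B =====
-- rank(c) = k.index(c) if c in k else n + SYMBOLS.index(c).  Python's list.index raises when the
-- element is absent; here each branch's index call is guarded (c in k / c drawn from SYMBOLS), so
-- the '.getD 0' default is never taken on any call B makes — the port is exact on those calls.
def pvRank (k : List Char) (c : Char) : Int :=
  if k.contains c then (((PySem.List.index? k c).getD 0 : Nat) : Int)
  else (k.length : Int) + (((PySem.List.index? pvSymChars c).getD 0 : Nat) : Int)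

def adfgvx_key_matrix_alt (key : String) : List (List String) :=
  let k := (PySem.Str.upper key).toList
  let order := (PySem.List.sorted pvSymChars (pvRank k) false).map pvMk
  (PySem.List.pyRange 0 36 6).map (fun i => PySem.List.slice order (some i) (some (i + 6)))

-- ===== PRECONDITION & SPEC =====
def Spec_adfgvx_key_matrix (key : String) (out : List (List String)) : Prop := out = adfgvx_key_matrix_alt key
instance (key : String) (out : List (List String)) : Decidable (Spec_adfgvx_key_matrix key out) := by unfold Spec_adfgvx_key_matrix; infer_instance

-- ===== CLAIM (what is proved, stated in full; the proofs are below) =====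
def Claim_equal_adfgvx_key_matrix : Prop := ∀ (key : String), Dom_adfgvx_key_matrix key → Spec_adfgvx_key_matrix key (adfgvx_key_matrix key)

-- ===== LEMMAS AND PROOFS =====

/-- ordered first-occurrence dedup against an explicit already-emitted list (models A's seen-set pass) -/
def pvDed {α : Type} [BEq α] (s : List α) : List α → List α
  | [] => []
  | c :: cs => if s.contains c then pvDed s cs else c :: pvDed (s ++ [c]) cs

theorem pvMem_pvDed {α : Type} [BEq α] [LawfulBEq α] (xs : List α) :
    ∀ (s : List α) (x : α), x ∈ pvDed s xs ↔ x ∈ xs ∧ x ∉ s := by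
  induction xs with
  | nil => intro s x; simp [pvDed]
  | cons c cs ih =>
    intro s x
    simp only [pvDed, List.contains_iff_mem]
    by_cases hm : c ∈ s
    · rw [if_pos hm, ih]
      constructor
      · rintro ⟨h1, h2⟩; exact ⟨List.mem_cons_of_mem _ h1, h2⟩
      · rintro ⟨h1, h2⟩
        rcases List.mem_cons.mp h1 with h | h
        · exact absurd (h ▸ hm) h2
        · exact ⟨h, h2⟩
    · rw [if_neg hm]
      simp only [List.mem_cons, ih (s ++ [c]) x, List.mem_append]
      constructor
      · rintro (rfl | ⟨h1, h2⟩)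
        · exact ⟨Or.inl rfl, hm⟩
        · exact ⟨Or.inr h1, fun hx => h2 (Or.inl hx)⟩
      · rintro ⟨rfl | h1, h2⟩
        · exact Or.inl rfl
        · by_cases hxc : x = c
          · exact Or.inl hxc
          · exact Or.inr ⟨h1, by simp [h2, hxc]⟩

theorem pvDed_nodup' {α : Type} [BEq α] [LawfulBEq α] (xs : List α) :
    ∀ (s : List α), (pvDed s xs).Nodup := by
  induction xs with
  | nil => intro s; simp [pvDed]
  | cons c cs ih =>
    intro s
    simp only [pvDed]
    by_cases hm : s.contains c = true
    · rw [if_pos hm]; exact ih s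
    · rw [if_neg hm]
      refine List.nodup_cons.mpr ⟨fun hc => ?_, ih (s ++ [c])⟩
      have := (pvMem_pvDed cs (s ++ [c]) c).mp hc
      exact this.2 (by simp)

theorem pvDed_pairwise_idxOf {α : Type} [BEq α] [LawfulBEq α] (xs : List α) :
    ∀ (s : List α), (pvDed s xs).Pairwise (fun a b => xs.idxOf a < xs.idxOf b) := by
  induction xs with
  | nil => intro s; simp [pvDed]
  | cons c cs ih =>
    intro s
    simp only [pvDed]
    by_cases hm : s.contains c = true
    · rw [if_pos hm]
      refine (ih s).imp_of_mem ?_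
      intro a b ha hb hlt
      have ha' := ((pvMem_pvDed cs s a).mp ha)
      have hb' := ((pvMem_pvDed cs s b).mp hb)
      have hac : a ≠ c := fun h => ha'.2 (h ▸ (List.contains_iff_mem.mp hm))
      have hbc : b ≠ c := fun h => hb'.2 (h ▸ (List.contains_iff_mem.mp hm))
      have e1 : (c == a) = false := beq_eq_false_iff_ne.mpr (Ne.symm hac)
      have e2 : (c == b) = false := beq_eq_false_iff_ne.mpr (Ne.symm hbc)
      simp [List.idxOf_cons, e1, e2]
      omega
    · rw [if_neg hm]
      refine List.pairwise_cons.mpr ⟨?_, ?_⟩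
      · intro b hb
        have hb' := (pvMem_pvDed cs (s ++ [c]) b).mp hb
        have hbc : b ≠ c := fun h => hb'.2 (by simp [h])
        have e2 : (c == b) = false := beq_eq_false_iff_ne.mpr (Ne.symm hbc)
        simp [List.idxOf_cons, e2]
      · refine (ih (s ++ [c])).imp_of_mem ?_
        intro a b ha hb hlt
        have ha' := (pvMem_pvDed cs (s ++ [c]) a).mp ha
        have hb' := (pvMem_pvDed cs (s ++ [c]) b).mp hb
        have hac : a ≠ c := fun h => ha'.2 (by simp [h])
        have hbc : b ≠ c := fun h => hb'.2 (by simp [h])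
        have e1 : (c == a) = false := beq_eq_false_iff_ne.mpr (Ne.symm hac)
        have e2 : (c == b) = false := beq_eq_false_iff_ne.mpr (Ne.symm hbc)
        simp [List.idxOf_cons, e1, e2]
        omega

theorem pvNodup_pairwise_idxOf {α : Type} [BEq α] [LawfulBEq α] (S : List α) (h : S.Nodup) :
    S.Pairwise (fun a b => S.idxOf a < S.idxOf b) := by
  induction S with
  | nil => simp
  | cons c cs ih =>
    simp only [List.nodup_cons] at h
    refine List.pairwise_cons.mpr ⟨?_, ?_⟩
    · intro b hb
      have hbc : b ≠ c := fun he => h.1 (he ▸ hb)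
      have e2 : (c == b) = false := beq_eq_false_iff_ne.mpr (Ne.symm hbc)
      simp [List.idxOf_cons, e2]
    · refine (ih h.2).imp_of_mem ?_
      intro a b ha hb hlt
      have hac : a ≠ c := fun he => h.1 (he ▸ ha)
      have hbc : b ≠ c := fun he => h.1 (he ▸ hb)
      have e1 : (c == a) = false := beq_eq_false_iff_ne.mpr (Ne.symm hac)
      have e2 : (c == b) = false := beq_eq_false_iff_ne.mpr (Ne.symm hbc)
      simp [List.idxOf_cons, e1, e2]
      omega

theorem pvFilter_idxOf_lt_iff {α : Type} [BEq α] [LawfulBEq α] (p : α → Bool) (k : List α) :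
    ∀ (a b : α), a ∈ k.filter p → b ∈ k.filter p →
      ((k.filter p).idxOf a < (k.filter p).idxOf b ↔ k.idxOf a < k.idxOf b) := by
  induction k with
  | nil => intro a b ha _; simp at ha
  | cons c cs ih =>
    intro a b ha hb
    by_cases hp : p c = true
    · simp only [List.filter_cons, hp, if_pos] at ha hb ⊢
      by_cases hac : a = c
      · subst hac
        by_cases hbc : b = a
        · subst hbc; simp
        · have e2 : (a == b) = false := beq_eq_false_iff_ne.mpr (Ne.symm hbc)
          simp [List.idxOf_cons, e2]
      · by_cases hbc : b = c
        · subst hbc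
          have e1 : (b == a) = false := beq_eq_false_iff_ne.mpr (Ne.symm hac)
          simp [List.idxOf_cons, e1]
        · have ha' : a ∈ cs.filter p := by
            rcases List.mem_cons.mp ha with h | h
            · exact absurd h hac
            · exact h
          have hb' : b ∈ cs.filter p := by
            rcases List.mem_cons.mp hb with h | h
            · exact absurd h hbc
            · exact h
          have e1 : (c == a) = false := beq_eq_false_iff_ne.mpr (Ne.symm hac)
          have e2 : (c == b) = false := beq_eq_false_iff_ne.mpr (Ne.symm hbc)
          simpa [List.idxOf_cons, e1, e2] using ih a b ha' hb'
    · simp only [List.filter_cons, hp, if_neg, Bool.false_eq_true, not_false_iff] at ha hb ⊢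
      have hac : a ≠ c := fun he => hp (by
        have := List.of_mem_filter ha; exact he ▸ this)
      have hbc : b ≠ c := fun he => hp (by
        have := List.of_mem_filter hb; exact he ▸ this)
      have e1 : (c == a) = false := beq_eq_false_iff_ne.mpr (Ne.symm hac)
      have e2 : (c == b) = false := beq_eq_false_iff_ne.mpr (Ne.symm hbc)
      simpa [List.idxOf_cons, e1, e2] using ih a b ha hb

theorem pvIndex?_of_mem {α : Type} [BEq α] [LawfulBEq α] (k : List α) (c : α)
    (h : c ∈ k) : PySem.List.index? k c = some (k.idxOf c) := by
  induction k with
  | nil => simp at h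
  | cons x xs ih =>
    by_cases hxc : x = c
    · subst hxc
      rw [PySem.List.index?_cons_self]
      simp
    · rw [PySem.List.index?_cons_of_ne xs hxc]
      have hc : c ∈ xs := by
        rcases List.mem_cons.mp h with h' | h'
        · exact absurd h'.symm hxc
        · exact h'
      have e1 : (x == c) = false := beq_eq_false_iff_ne.mpr hxc
      rw [ih hc]
      simp [List.idxOf_cons, e1]

theorem pvRank_of_mem (k : List Char) (c : Char) (h : c ∈ k) :
    pvRank k c = (k.idxOf c : Int) := by
  rw [pvRank, if_pos (List.contains_iff_mem.mpr h), pvIndex?_of_mem k c h]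
  simp

theorem pvRank_of_not_mem (k : List Char) (c : Char) (h : c ∉ k) (hs : c ∈ pvSymChars) :
    pvRank k c = (k.length : Int) + (pvSymChars.idxOf c : Int) := by
  rw [pvRank, if_neg (by simp [h]), pvIndex?_of_mem pvSymChars c hs]
  simp

theorem pvSym_nodup : pvSymChars.Nodup := by decide

theorem pvFold1 (L : List Char) : ∀ (s : PySem.Set Char) (m : List String),
    L.foldl
      (fun (st : PySem.Set Char × List String) ch =>
        if pvSymChars.contains ch && !(PySem.Set.contains st.1 ch) then
          (PySem.Set.add st.1 ch, st.2 ++ [pvMk ch])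
        else st)
      (s, m)
    = (s ++ pvDed s (L.filter (fun c => pvSymChars.contains c)),
       m ++ (pvDed s (L.filter (fun c => pvSymChars.contains c))).map pvMk) := by
  induction L with
  | nil => intro s m; simp [pvDed]
  | cons c cs ih =>
    intro s m
    rw [List.foldl_cons]
    by_cases hp : c ∈ pvSymChars
    · by_cases hm : c ∈ s
      · rw [if_neg (by simp [hm] :
            ¬ (pvSymChars.contains c && !(PySem.Set.contains s c)) = true), ih s m]
        simp [hp, hm, pvDed]
      · rw [if_pos (by simp [hp, hm] :
            (pvSymChars.contains c && !(PySem.Set.contains s c)) = true)]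
        have hadd : PySem.Set.add s c = s ++ [c] := by simp [PySem.Set.add, hm]
        rw [hadd, ih (s ++ [c]) (m ++ [pvMk c])]
        simp [hp, hm, pvDed, List.append_assoc]
    · rw [if_neg (by simp [hp] :
          ¬ (pvSymChars.contains c && !(PySem.Set.contains s c)) = true), ih s m]
      simp [hp]

theorem pvFold2 (S : List Char) : ∀ (s : PySem.Set Char) (m : List String),
    S.foldl
      (fun (st : PySem.Set Char × List String) ch =>
        if !(PySem.Set.contains st.1 ch) then (st.1, st.2 ++ [pvMk ch]) else st)
      (s, m)
    = (s, m ++ (S.filter (fun c => !s.contains c)).map pvMk) := by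
  induction S with
  | nil => intro s m; simp
  | cons c cs ih =>
    intro s m
    rw [List.foldl_cons]
    by_cases hm : c ∈ s
    · rw [if_neg (by simp [hm] : ¬ (!(PySem.Set.contains s c)) = true), ih s m]
      simp [hm]
    · rw [if_pos (by simp [hm] : (!(PySem.Set.contains s c)) = true), ih s (m ++ [pvMk c])]
      simp [hm, List.append_assoc]

/-- the sorted order B computes IS A's order: dedup of valid key chars, then the leftover symbols -/
theorem pvSorted_eq (k : List Char) :
    PySem.List.sorted pvSymChars (pvRank k) false
      = pvDed [] (k.filter (fun c => pvSymChars.contains c))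
        ++ pvSymChars.filter
             (fun c => !(pvDed [] (k.filter (fun c => pvSymChars.contains c))).contains c) := by
  set F := k.filter (fun c => pvSymChars.contains c) with hF
  set D := pvDed ([] : List Char) F with hD
  set R := pvSymChars.filter (fun c => !D.contains c) with hR
  have hDsub : ∀ x ∈ D, x ∈ F := fun x hx => ((pvMem_pvDed F [] x).mp hx).1
  have hDmemk : ∀ x ∈ D, x ∈ k := fun x hx => List.mem_of_mem_filter (hDsub x hx)
  have hDmemS : ∀ x ∈ D, x ∈ pvSymChars := fun x hx => by
    have := List.of_mem_filter (hDsub x hx); simpa using this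
  have hDnd : D.Nodup := pvDed_nodup' F []
  have hRnd : R.Nodup := List.Nodup.filter _ pvSym_nodup
  have hdisj : ∀ x ∈ D, x ∉ R := by
    intro x hx hxr
    have := List.of_mem_filter hxr
    simp only [Bool.not_eq_eq_eq_not, Bool.not_true] at this
    exact absurd hx (by simpa using this)
  have hnd : (D ++ R).Nodup := by
    refine List.Nodup.append hDnd hRnd ?_
    intro x hx hxr; exact hdisj x hx hxr
  have hperm : (D ++ R).Perm pvSymChars := by
    rw [List.perm_ext_iff_of_nodup hnd pvSym_nodup]
    intro x
    simp only [List.mem_append, hR, List.mem_filter, Bool.not_eq_eq_eq_not, Bool.not_true]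
    constructor
    · rintro (hx | ⟨hx, _⟩)
      · exact hDmemS x hx
      · exact hx
    · intro hx
      by_cases hxd : x ∈ D
      · exact Or.inl hxd
      · exact Or.inr ⟨hx, by simpa using hxd⟩
  have hpw : (D ++ R).Pairwise (fun a b => pvRank k a < pvRank k b) := by
    rw [List.pairwise_append]
    refine ⟨?_, ?_, ?_⟩
    · -- inside D: first-occurrence order in k
      refine ((pvDed_pairwise_idxOf F []).imp_of_mem ?_)
      intro a b ha hb hlt
      have ha' := hDsub a ha; have hb' := hDsub b hb
      rw [pvRank_of_mem k a (hDmemk a ha), pvRank_of_mem k b (hDmemk b hb)]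
      have := (pvFilter_idxOf_lt_iff _ k a b ha' hb').mp hlt
      exact_mod_cast this
    · -- inside R: SYMBOLS order
      have hsub : R.Sublist pvSymChars := List.filter_sublist
      have := (pvNodup_pairwise_idxOf pvSymChars pvSym_nodup).sublist hsub
      refine this.imp_of_mem ?_
      intro a b ha hb hlt
      have haS : a ∈ pvSymChars := List.mem_of_mem_filter ha
      have hbS : b ∈ pvSymChars := List.mem_of_mem_filter hb
      have hank : a ∉ k := by
        intro hk
        have : a ∈ D := (pvMem_pvDed F [] a).mpr
          ⟨List.mem_filter.mpr ⟨hk, by simpa using haS⟩, by simp⟩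
        have := List.of_mem_filter ha
        simp only [Bool.not_eq_eq_eq_not, Bool.not_true] at this
        exact absurd ‹a ∈ D› (by simpa using this)
      have hbnk : b ∉ k := by
        intro hk
        have : b ∈ D := (pvMem_pvDed F [] b).mpr
          ⟨List.mem_filter.mpr ⟨hk, by simpa using hbS⟩, by simp⟩
        have := List.of_mem_filter hb
        simp only [Bool.not_eq_eq_eq_not, Bool.not_true] at this
        exact absurd ‹b ∈ D› (by simpa using this)
      rw [pvRank_of_not_mem k a hank haS, pvRank_of_not_mem k b hbnk hbS]
      omega
    · -- across: key chars come before leftover symbols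
      intro a ha b hb
      have hak : a ∈ k := hDmemk a ha
      have hbS : b ∈ pvSymChars := List.mem_of_mem_filter hb
      have hbnk : b ∉ k := by
        intro hk
        have : b ∈ D := (pvMem_pvDed F [] b).mpr
          ⟨List.mem_filter.mpr ⟨hk, by simpa using hbS⟩, by simp⟩
        exact hdisj b this hb
      rw [pvRank_of_mem k a hak, pvRank_of_not_mem k b hbnk hbS]
      have : k.idxOf a < k.length := List.idxOf_lt_length_of_mem hak
      omega
  exact PySem.List.sorted_eq_of_perm_of_pairwise_lt pvSymChars (D ++ R) (pvRank k) hperm hpw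

-- ===== VERDICT (by name: the statement is the Claim_ definition above) =====
theorem adfgvx_key_matrix_spec : Claim_equal_adfgvx_key_matrix := by
  intro key _
  show adfgvx_key_matrix key = adfgvx_key_matrix_alt key
  simp only [adfgvx_key_matrix, adfgvx_key_matrix_alt]
  set L := (PySem.Str.upper key).toList with hL
  have hempty : (PySem.Set.empty : PySem.Set Char) = ([] : List Char) := rfl
  rw [hempty]
  have h1 := pvFold1 L ([] : PySem.Set Char) []
  simp only [List.nil_append] at h1
  rw [h1, pvFold2, pvSorted_eq]
  simp
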